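-- pv_equiv track=rewrite | github.com/dbehdrnr0202/programmers | KAKAO/_2024_KAKAO_WINTER_INTERNSHIP/sol258712.py | solution
-- ===== SOURCE A (Python) =====
-- GIFT_FROM = 1
--
-- GIFT_TO = 0
--
-- def solution(friends, gifts):
--     answer = 0
--     friend_index_dict = {friend:index for index, friend in enumerate(friends)}
--     gift_map = [[0 for _ in range(len(friends))] for _ in range(len(friends))]
--     gift_list = [[0 for _ in range(3)] for _ in range(len(friends))]
--
--     for gift in gifts:
--         gift_from, gift_to = gift.split(" ")
--         gift_from = friend_index_dict[gift_from]
--         gift_to =  friend_index_dict[gift_to]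
--         gift_map[gift_from][gift_to]+=1
--         gift_list[gift_from][GIFT_TO]+=1
--         gift_list[gift_to][GIFT_FROM]+=1
--
--     for gift in range(len(gift_list)):
--         gift_list[gift][2] = gift_list[gift][GIFT_TO]-gift_list[gift][GIFT_FROM]
--
--     gift_score = [0 for _ in range(len(friends))]
--
--     for gift_from in range(len(gift_map)):
--         for gift_to in range(len(gift_map[gift_from])):
--             # 같은 사람
--             if gift_from == gift_to:
--                 continue
--             # 기록 O
--             if gift_map[gift_from][gift_to]>gift_map[gift_to][gift_from]:
--                 gift_score[gift_from]+=1
--                 continue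
--             # 기록 X
--             if gift_map[gift_from][gift_to]==0 and gift_map[gift_to][gift_from]==0:
--                 if gift_list[gift_from][2]>gift_list[gift_to][2]:
--                     gift_score[gift_from]+=1
--                 continue
--             if gift_map[gift_from][gift_to]==gift_map[gift_to][gift_from]:
--                 if gift_list[gift_from][2]>gift_list[gift_to][2]:
--                     gift_score[gift_from]+=1
--     answer = max(gift_score)
--     return answer
-- ===== SOURCE B (Python) =====
-- def solution(friends, gifts):
--     n = len(friends)
--     idx = {f: i for i, f in enumerate(friends)}
--     cnt = {}
--     net = [0] * n
--     for gift in gifts: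
--         a, b = gift.split(" ")
--         i, j = idx[a], idx[b]
--         cnt[(i, j)] = cnt.get((i, j), 0) + 1
--         net[i] += 1
--         net[j] -= 1
--     # baseline: decide every pair by the gift index (net), via sort + rank instead of n^2 comparisons
--     rank = {}
--     for pos, v in enumerate(sorted(net)):
--         if v not in rank:
--             rank[v] = pos
--     score = [rank[net[i]] for i in range(n)]
--     # corrections: only pairs with an unequal direct-gift record deviate from the baseline
--     for (i, j) in cnt:
--         if (j, i) in cnt and j < i:
--             continue  # this unordered pair is handled from its other orientation
--         a, b = cnt[(i, j)], cnt.get((j, i), 0)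
--         if a == b:
--             continue
--         w, l = (i, j) if a > b else (j, i)
--         score[w] += 0 if net[l] < net[w] else 1
--         score[l] -= 1 if net[w] < net[l] else 0
--     return max(score)
-- ===== Notes on version B (the rewrite author's own statement) =====
-- stated objective: faster
-- what changed: B drops A's dense n-by-n matrix and O(n^2) all-ordered-pairs scan: it keeps a sparse dict of direct-gift counts and per-person net totals, computes every person's baseline wins at once by sorting the nets and ranking each net by the number of strictly smaller ones, then corrects only the O(g) pairs that actually have an unequal direct-gift record.
import Mathlib
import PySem

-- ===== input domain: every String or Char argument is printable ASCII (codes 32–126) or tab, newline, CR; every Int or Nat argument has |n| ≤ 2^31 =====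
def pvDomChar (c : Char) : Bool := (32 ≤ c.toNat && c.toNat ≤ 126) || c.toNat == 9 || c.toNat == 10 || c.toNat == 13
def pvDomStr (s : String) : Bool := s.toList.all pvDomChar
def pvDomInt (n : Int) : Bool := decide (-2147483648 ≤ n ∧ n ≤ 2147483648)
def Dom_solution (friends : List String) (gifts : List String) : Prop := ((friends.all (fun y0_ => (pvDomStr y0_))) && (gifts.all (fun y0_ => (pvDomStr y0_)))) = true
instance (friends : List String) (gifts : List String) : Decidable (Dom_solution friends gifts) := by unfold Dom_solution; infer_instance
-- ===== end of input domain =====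

-- B is a faster implementation: instead of A's dense n×n matrix and scan of all ordered pairs,
-- it keeps a sparse dict of direct-gift counts and per-person net totals, gets every person's
-- baseline wins by sorting the nets once and ranking, and corrects only the pairs that
-- actually have an unequal direct-gift record.

-- ===== shared helpers (both Pythons contain these identical operations) =====

-- l[k] += 1 on a 1-D list
def pvInc1 (l : List Int) (k : Nat) : List Int := l.set k (l.getD k 0 + 1)

-- m[i][j] read on a 2-D list
def pvGet2 (m : List (List Int)) (i j : Nat) : Int := (m.getD i []).getD j 0

-- m[i][j] += 1 on a 2-D list
def pvInc2 (m : List (List Int)) (i j : Nat) : List (List Int) :=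
  m.set i ((m.getD i []).set j (pvGet2 m i j + 1))

-- {friend: index for index, friend in enumerate(friends)}  (same comprehension in both Pythons)
def pvMkIdx (friends : List String) : PySem.Dict String Int :=
  (PySem.List.enumerate friends).foldl (fun d p => d.insert p.2 p.1) PySem.Dict.empty

-- gift.split(" ") unpacked into two names, both looked up in the index dict; none exactly where
-- Python raises ValueError (unpack of ≠2 parts) or KeyError (name missing). Dict values are
-- enumerate positions, hence ≥ 0, so .toNat is exact.
def pvParse (fidx : PySem.Dict String Int) (gift : String) : Option (Nat × Nat) :=
  match PySem.Str.split? gift " " with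
  | some [gf, gt] =>
    match fidx.get? gf, fidx.get? gt with
    | some a, some b => some (a.toNat, b.toNat)
    | _, _ => none
  | _ => none

-- ===== PORT A =====

-- body of A's gift loop after the parse: gift_map[a][b]+=1; gift_list[a][0]+=1; gift_list[b][1]+=1
def pvPairStepA (st : List (List Int) × List (List Int)) (p : Nat × Nat) :
    List (List Int) × List (List Int) :=
  (pvInc2 st.1 p.1 p.2, pvInc2 (pvInc2 st.2 p.1 0) p.2 1)

def pvStepA (fidx : PySem.Dict String Int) (st : List (List Int) × List (List Int))
    (gift : String) : List (List Int) × List (List Int) :=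
  match pvParse fidx gift with
  | some p => pvPairStepA st p
  | none => st

-- body of A's scoring double loop, parametrised by the reads it performs:
-- c x y = gift_map[x][y], d x = gift_list[x][2]
def pvStepScoreA (c : Nat → Nat → Int) (d : Nat → Int) (s : List Int) (i j : Nat) : List Int :=
  if i = j then s
  else if c j i < c i j then pvInc1 s i
  else if c i j = 0 ∧ c j i = 0 then (if d j < d i then pvInc1 s i else s)
  else if c i j = c j i then (if d j < d i then pvInc1 s i else s)
  else s

def solution (friends : List String) (gifts : List String) : Int :=
  let n := friends.length
  let fidx := pvMkIdx friends
  let st := gifts.foldl (pvStepA fidx)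
    (List.replicate n (List.replicate n 0), List.replicate n (List.replicate 3 0))
  let gm := st.1
  -- for gift in range(len(gift_list)): gift_list[gift][2] = gift_list[gift][0] - gift_list[gift][1]
  let gl := (List.range st.2.length).foldl
    (fun gl i => gl.set i ((gl.getD i []).set 2 (pvGet2 gl i 0 - pvGet2 gl i 1))) st.2
  let score := (List.range gm.length).foldl (fun s i =>
      (List.range (gm.getD i []).length).foldl (fun s j =>
        pvStepScoreA (fun x y => pvGet2 gm x y) (fun x => pvGet2 gl x 2) s i j) s)
    (List.replicate n (0 : Int))
  (PySem.List.max? score id).getD 0   -- max(gift_score); empty list (ValueError) excluded by Pre_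

-- ===== PORT B =====

-- body of B's gift loop after the parse:
-- cnt[(i,j)] = cnt.get((i,j),0)+1 ; net[i] += 1 ; net[j] -= 1
def pvPairStepC (st : PySem.Dict (Nat × Nat) Int × List Int) (p : Nat × Nat) :
    PySem.Dict (Nat × Nat) Int × List Int :=
  (st.1.modify p 0 (· + 1),
   (st.2.set p.1 (st.2.getD p.1 0 + 1)).set p.2
     ((st.2.set p.1 (st.2.getD p.1 0 + 1)).getD p.2 0 - 1))

def pvStepC (fidx : PySem.Dict String Int) (st : PySem.Dict (Nat × Nat) Int × List Int)
    (gift : String) : PySem.Dict (Nat × Nat) Int × List Int :=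
  match pvParse fidx gift with
  | some p => pvPairStepC st p
  | none => st

-- for pos, v in enumerate(sorted(net)): if v not in rank: rank[v] = pos
def pvRankDict (s : List Int) : PySem.Dict Int Int :=
  (PySem.List.enumerate s).foldl
    (fun d p => if d.contains p.2 then d else d.insert p.2 p.1) PySem.Dict.empty

-- B's correction-loop body for one key (i, j) of cnt
def pvCorrStep (cnt : PySem.Dict (Nat × Nat) Int) (net : List Int) (s : List Int)
    (p : Nat × Nat) : List Int :=
  if cnt.contains (p.2, p.1) && decide (p.2 < p.1) then s   -- pair handled from its other orientation
  else
    let a := cnt.getD p 0          -- cnt[(i,j)]: the key is present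
    let b := cnt.getD (p.2, p.1) 0
    if a = b then s
    else
      let w := if b < a then p.1 else p.2
      let l := if b < a then p.2 else p.1
      let s1 := s.set w (s.getD w 0 + (if net.getD l 0 < net.getD w 0 then 0 else 1))
      s1.set l (s1.getD l 0 - (if net.getD w 0 < net.getD l 0 then 1 else 0))

def solution_alt (friends : List String) (gifts : List String) : Int :=
  let n := friends.length
  let fidx := pvMkIdx friends
  let st := gifts.foldl (pvStepC fidx) (PySem.Dict.empty, List.replicate n (0 : Int))
  let cnt := st.1
  let net := st.2
  let rank := pvRankDict (PySem.List.sorted net (fun x => x) false)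
  let score0 := (List.range n).map (fun i => rank.getD (net.getD i 0) 0)  -- rank[net[i]]: key present
  let score := cnt.keys.foldl (pvCorrStep cnt net) score0
  (PySem.List.max? score (fun x => x)).getD 0   -- max(score); empty list (ValueError) excluded by Pre_

-- ===== PRECONDITION & SPEC =====

-- Pre_ excludes exactly the inputs where the Python raises: empty friends (ValueError from max of
-- an empty list), a gift that does not split on " " into exactly two parts (ValueError), and a
-- gift naming someone not in friends (KeyError).
def Pre_solution (friends : List String) (gifts : List String) : Prop :=
  friends ≠ [] ∧ ∀ g ∈ gifts,
    ((PySem.Str.split? g " ").getD []).length = 2 ∧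
      ∀ x ∈ (PySem.Str.split? g " ").getD [], x ∈ friends

instance (friends : List String) (gifts : List String) : Decidable (Pre_solution friends gifts) := by
  unfold Pre_solution; infer_instance

def pvWitness_solution : List String × List String := (["a", "b"], ["a b", "b a", "a b"])

def Spec_solution (friends : List String) (gifts : List String) (out : Int) : Prop :=
  out = solution_alt friends gifts
instance (friends : List String) (gifts : List String) (out : Int) :
    Decidable (Spec_solution friends gifts out) := by unfold Spec_solution; infer_instance

-- ===== CLAIM (what is proved, stated in full; the proofs are below) =====
def Claim_equal_solution : Prop := ∀ (friends : List String) (gifts : List String),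
  Dom_solution friends gifts → Pre_solution friends gifts →
    Spec_solution friends gifts (solution friends gifts)

-- ===== LEMMAS AND PROOFS =====

-- the list of parsed (giver, receiver) index pairs
def pvPairs (fidx : PySem.Dict String Int) (gifts : List String) : List (Nat × Nat) :=
  gifts.filterMap (pvParse fidx)

-- the pair's winner test: more direct gifts, or equal direct gifts and larger gift index
def pvWin (c : Nat → Nat → Int) (d : Nat → Int) (i j : Nat) : Bool :=
  decide (c j i < c i j ∨ (c i j = c j i ∧ d j < d i))

-- model values after the gift loop
def pvCntF (pl : List (Nat × Nat)) (i j : Nat) : Int := (pl.count (i, j) : Int)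
def pvGivF (pl : List (Nat × Nat)) (k : Nat) : Int := (pl.countP (fun p => p.1 == k) : Int)
def pvRcvF (pl : List (Nat × Nat)) (k : Nat) : Int := (pl.countP (fun p => p.2 == k) : Int)
def pvDF (pl : List (Nat × Nat)) (k : Nat) : Int := pvGivF pl k - pvRcvF pl k

lemma pvInc1_length (l : List Int) (k : Nat) : (pvInc1 l k).length = l.length := by
  simp [pvInc1]

lemma pvInc1_getD (l : List Int) (k : Nat) (hk : k < l.length) (j : Nat) :
    (pvInc1 l k).getD j 0 = if j = k then l.getD j 0 + 1 else l.getD j 0 := by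
  simp only [pvInc1, List.getD_eq_getElem?_getD, List.getElem?_set]
  by_cases h : j = k
  · subst h; simp [hk]
  · rw [if_neg (fun hh : k = j => h hh.symm), if_neg h]

lemma pvInc2_length (m : List (List Int)) (a b : Nat) : (pvInc2 m a b).length = m.length := by
  simp [pvInc2]

lemma pvInc2_rowlen (m : List (List Int)) (a b L : Nat) (ha : a < m.length)
    (h : ∀ r ∈ m, r.length = L) : ∀ r ∈ pvInc2 m a b, r.length = L := by
  intro r hr
  rcases List.mem_or_eq_of_mem_set hr with hr' | hr'
  · exact h r hr'
  · subst hr'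
    rw [List.length_set]
    exact h _ (by rw [List.getD_eq_getElem _ _ ha]; exact List.getElem_mem ha)

lemma pvGet2_pvInc2 (m : List (List Int)) (a b i j : Nat) (ha : a < m.length)
    (hb : b < (m.getD a []).length) :
    pvGet2 (pvInc2 m a b) i j = if i = a ∧ j = b then pvGet2 m i j + 1 else pvGet2 m i j := by
  by_cases hia : i = a
  · subst hia
    have hb' : b < m[i].length := by rwa [List.getD_eq_getElem m [] ha] at hb
    by_cases hjb : j = b
    · subst hjb
      simp [pvGet2, pvInc2, List.getD_eq_getElem?_getD, ha, hb']
    · simp [pvGet2, pvInc2, List.getD_eq_getElem?_getD, ha, hjb, Ne.symm hjb]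
  · simp [pvGet2, pvInc2, List.getD_eq_getElem?_getD, hia, Ne.symm hia]

lemma pvMkIdx_bound (friends : List String) (s : String) (v : Int)
    (h : (pvMkIdx friends).get? s = some v) : 0 ≤ v ∧ v < friends.length := by
  have aux : ∀ (fs : List String) (start : Int) (d0 : PySem.Dict String Int) (s : String) (v : Int),
      ((PySem.List.enumerate fs start).foldl (fun d p => d.insert p.2 p.1) d0).get? s = some v →
      (start ≤ v ∧ v < start + fs.length) ∨ d0.get? s = some v := by
    intro fs
    induction fs with
    | nil => intro start d0 s v h; right; exact h
    | cons x t ih =>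
      intro start d0 s v h
      have he : PySem.List.enumerate (x :: t) start
          = (start, x) :: PySem.List.enumerate t (start + 1) := rfl
      rw [he] at h
      simp only [List.foldl_cons] at h
      rcases ih (start + 1) (d0.insert x start) s v h with h1 | h2
      · left
        simp only [List.length_cons]
        push_cast [List.length_cons] at h1 ⊢
        omega
      · rw [PySem.Dict.get?_insert] at h2
        by_cases hsx : s = x
        · rw [if_pos hsx] at h2
          left
          have hv : v = start := by injection h2.symm
          subst hv
          simp only [List.length_cons]
          push_cast
          omega
        · rw [if_neg hsx] at h2
          right; exact h2
  rcases aux friends 0 PySem.Dict.empty s v h with h1 | h2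
  · omega
  · exact absurd h2 (by simp [show (PySem.Dict.empty : PySem.Dict String Int).get? s = none from rfl])

lemma pvParse_bound (friends : List String) (g : String) (p : Nat × Nat)
    (h : pvParse (pvMkIdx friends) g = some p) : p.1 < friends.length ∧ p.2 < friends.length := by
  unfold pvParse at h
  split at h
  · split at h
    · rename_i a b ha hb
      obtain ⟨h1, h2⟩ := pvMkIdx_bound friends _ a ha
      obtain ⟨h3, h4⟩ := pvMkIdx_bound friends _ b hb
      injection h with h'
      subst h'
      constructor <;> simp <;> omega
    · simp at h
  · simp at h

lemma pvFoldA (fidx : PySem.Dict String Int) (gifts : List String)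
    (st : List (List Int) × List (List Int)) :
    gifts.foldl (pvStepA fidx) st = (pvPairs fidx gifts).foldl pvPairStepA st := by
  induction gifts generalizing st with
  | nil => rfl
  | cons g t ih =>
    simp only [List.foldl_cons, pvPairs, List.filterMap_cons]
    cases h : pvParse fidx g with
    | none => simpa [pvStepA, h, pvPairs] using ih st
    | some p => simpa [pvStepA, h, pvPairs] using ih (pvPairStepA st p)

lemma pvGet2_replicate (n m i j : Nat) :
    pvGet2 (List.replicate n (List.replicate m (0 : Int))) i j = 0 := by
  simp only [pvGet2, List.getD_eq_getElem?_getD, List.getElem?_replicate]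
  split_ifs <;> simp [List.getElem?_replicate] <;> split_ifs <;> simp

lemma pvGetD_replicate (n k : Nat) : (List.replicate n (0 : Int)).getD k 0 = 0 := by
  simp only [List.getD_eq_getElem?_getD, List.getElem?_replicate]
  split_ifs <;> simp

lemma pvRowLen (m : List (List Int)) (L a : Nat) (hr : ∀ r ∈ m, r.length = L)
    (ha : a < m.length) : (m.getD a []).length = L := by
  rw [List.getD_eq_getElem _ _ ha]
  exact hr _ (List.getElem_mem ha)

-- phase-1 characterisation, A side
lemma pvPhaseA (n : Nat) (pl : List (Nat × Nat)) (hval : ∀ p ∈ pl, p.1 < n ∧ p.2 < n) :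
    (pl.foldl pvPairStepA
        (List.replicate n (List.replicate n 0), List.replicate n (List.replicate 3 0))).1.length = n ∧
    (∀ r ∈ (pl.foldl pvPairStepA
        (List.replicate n (List.replicate n 0), List.replicate n (List.replicate 3 0))).1, r.length = n) ∧
    (∀ i j, i < n → j < n →
      pvGet2 (pl.foldl pvPairStepA
        (List.replicate n (List.replicate n 0), List.replicate n (List.replicate 3 0))).1 i j = pvCntF pl i j) ∧
    (pl.foldl pvPairStepA
        (List.replicate n (List.replicate n 0), List.replicate n (List.replicate 3 0))).2.length = n ∧
    (∀ r ∈ (pl.foldl pvPairStepA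
        (List.replicate n (List.replicate n 0), List.replicate n (List.replicate 3 0))).2, r.length = 3) ∧
    (∀ k, k < n →
      pvGet2 (pl.foldl pvPairStepA
        (List.replicate n (List.replicate n 0), List.replicate n (List.replicate 3 0))).2 k 0 = pvGivF pl k ∧
      pvGet2 (pl.foldl pvPairStepA
        (List.replicate n (List.replicate n 0), List.replicate n (List.replicate 3 0))).2 k 1 = pvRcvF pl k) := by
  revert hval
  induction pl using List.reverseRecOn with
  | nil =>
    intro _
    refine ⟨by simp, ?_, ?_, by simp, ?_, ?_⟩
    · intro r hr
      simp only [List.foldl_nil] at hr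
      rw [List.eq_of_mem_replicate hr]; simp
    · intro i j _ _
      simp [pvGet2_replicate, pvCntF]
    · intro r hr
      simp only [List.foldl_nil] at hr
      rw [List.eq_of_mem_replicate hr]; simp
    · intro k _
      constructor <;>
        · simp only [List.foldl_nil, pvGivF, pvRcvF, pvGet2, List.getD_eq_getElem?_getD,
            List.getElem?_replicate, List.countP_nil]
          split_ifs <;> simp
  | append_singleton q p ih =>
    intro hval
    obtain ⟨pa, pb⟩ := p
    have hq := fun p hp => hval p (List.mem_append_left _ hp)
    have hp : pa < n ∧ pb < n := hval _ (List.mem_append_right _ (List.mem_singleton_self _))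
    obtain ⟨hl1, hr1, hg1, hl2, hr2, hgl⟩ := ih hq
    simp only [List.foldl_append, List.foldl_cons, List.foldl_nil] at *
    set st := q.foldl pvPairStepA
      (List.replicate n (List.replicate n 0), List.replicate n (List.replicate 3 0)) with hst
    have ha1 : pa < st.1.length := by omega
    have hb1 : pb < (st.1.getD pa []).length := by rw [pvRowLen st.1 n pa hr1 ha1]; exact hp.2
    have ha2 : pa < st.2.length := by omega
    have hb2 : (0 : Nat) < (st.2.getD pa []).length := by rw [pvRowLen st.2 3 pa hr2 ha2]; omega
    have hrows2' : ∀ r ∈ pvInc2 st.2 pa 0, r.length = 3 := pvInc2_rowlen st.2 pa 0 3 ha2 hr2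
    have ha3 : pb < (pvInc2 st.2 pa 0).length := by rw [pvInc2_length]; omega
    have hb3 : (1 : Nat) < ((pvInc2 st.2 pa 0).getD pb []).length := by
      rw [pvRowLen _ 3 pb hrows2' ha3]; omega
    refine ⟨?_, ?_, ?_, ?_, ?_, ?_⟩
    · simp [pvPairStepA, pvInc2_length, hl1]
    · exact pvInc2_rowlen st.1 pa pb n ha1 hr1
    · intro i j hi hj
      simp only [pvPairStepA]
      rw [pvGet2_pvInc2 st.1 pa pb i j ha1 hb1, hg1 i j hi hj]
      by_cases hc : i = pa ∧ j = pb
      · simp only [if_pos hc, pvCntF, List.count_append, hc.1, hc.2, List.count_singleton]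
        push_cast
        simp
      · have hne : ¬((pa, pb) = (i, j)) := by
          rintro h'
          injection h' with e1 e2
          exact hc ⟨e1.symm, e2.symm⟩
        simp [pvCntF, List.count_append, List.count_singleton, hc, hne]
    · simp [pvPairStepA, pvInc2_length, hl2]
    · exact pvInc2_rowlen _ pb 1 3 ha3 hrows2'
    · intro k hk
      simp only [pvPairStepA]
      constructor
      · rw [pvGet2_pvInc2 _ pb 1 k 0 ha3 hb3,
          if_neg (by rintro ⟨-, h0⟩; exact absurd h0 (by omega)),
          pvGet2_pvInc2 st.2 pa 0 k 0 ha2 hb2, (hgl k hk).1]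
        by_cases hc : k = pa
        · simp [pvGivF, List.countP_append, hc]
        · have hc' : ¬pa = k := fun h => hc h.symm
          simp [pvGivF, List.countP_append, hc, hc']
      · rw [pvGet2_pvInc2 _ pb 1 k 1 ha3 hb3]
        by_cases hc : k = pb
        · rw [if_pos ⟨hc, rfl⟩, pvGet2_pvInc2 st.2 pa 0 k 1 ha2 hb2,
            if_neg (by rintro ⟨-, h0⟩; exact absurd h0 (by omega)), (hgl k hk).2]
          simp [pvRcvF, List.countP_append, hc]
        · rw [if_neg (by rintro ⟨h0, -⟩; exact hc h0),
            pvGet2_pvInc2 st.2 pa 0 k 1 ha2 hb2,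
            if_neg (by rintro ⟨-, h0⟩; exact absurd h0 (by omega)), (hgl k hk).2]
          have hc' : ¬pb = k := fun h => hc h.symm
          simp [pvRcvF, List.countP_append, hc, hc']

-- generic 2-D set, like pvGet2_pvInc2
lemma pvGet2_set2 (m : List (List Int)) (a t : Nat) (v : Int) (ha : a < m.length)
    (ht : t < (m.getD a []).length) (i j : Nat) :
    pvGet2 (m.set a ((m.getD a []).set t v)) i j = if i = a ∧ j = t then v else pvGet2 m i j := by
  by_cases hia : i = a
  · subst hia
    have ht' : t < m[i].length := by rwa [List.getD_eq_getElem m [] ha] at ht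
    by_cases hjt : j = t
    · subst hjt
      simp [pvGet2, List.getD_eq_getElem?_getD, ha, ht']
    · simp [pvGet2, List.getD_eq_getElem?_getD, ha, hjt, Ne.symm hjt]
  · simp [pvGet2, List.getD_eq_getElem?_getD, hia, Ne.symm hia]

lemma pvSet2_rowlen (m : List (List Int)) (a t : Nat) (v : Int) (L : Nat) (ha : a < m.length)
    (h : ∀ r ∈ m, r.length = L) : ∀ r ∈ m.set a ((m.getD a []).set t v), r.length = L := by
  intro r hr
  rcases List.mem_or_eq_of_mem_set hr with hr' | hr'
  · exact h r hr'
  · subst hr'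
    rw [List.length_set]
    exact h _ (by rw [List.getD_eq_getElem _ _ ha]; exact List.getElem_mem ha)

-- phase-2 (A's diff loop) characterisation
lemma pvPhase2 (gl : List (List Int)) (hrow : ∀ r ∈ gl, r.length = 3) :
    ((List.range gl.length).foldl
        (fun gl i => gl.set i ((gl.getD i []).set 2 (pvGet2 gl i 0 - pvGet2 gl i 1))) gl).length = gl.length ∧
    ∀ k, k < gl.length →
      pvGet2 ((List.range gl.length).foldl
        (fun gl i => gl.set i ((gl.getD i []).set 2 (pvGet2 gl i 0 - pvGet2 gl i 1))) gl) k 2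
        = pvGet2 gl k 0 - pvGet2 gl k 1 := by
  have aux : ∀ m, m ≤ gl.length →
      ((List.range m).foldl
          (fun gl i => gl.set i ((gl.getD i []).set 2 (pvGet2 gl i 0 - pvGet2 gl i 1))) gl).length = gl.length ∧
      (∀ r ∈ (List.range m).foldl
          (fun gl i => gl.set i ((gl.getD i []).set 2 (pvGet2 gl i 0 - pvGet2 gl i 1))) gl, r.length = 3) ∧
      ∀ k,
        pvGet2 ((List.range m).foldl
          (fun gl i => gl.set i ((gl.getD i []).set 2 (pvGet2 gl i 0 - pvGet2 gl i 1))) gl) k 0 = pvGet2 gl k 0 ∧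
        pvGet2 ((List.range m).foldl
          (fun gl i => gl.set i ((gl.getD i []).set 2 (pvGet2 gl i 0 - pvGet2 gl i 1))) gl) k 1 = pvGet2 gl k 1 ∧
        pvGet2 ((List.range m).foldl
          (fun gl i => gl.set i ((gl.getD i []).set 2 (pvGet2 gl i 0 - pvGet2 gl i 1))) gl) k 2
          = (if k < m then pvGet2 gl k 0 - pvGet2 gl k 1 else pvGet2 gl k 2) := by
    intro m
    induction m with
    | zero => intro _; exact ⟨rfl, hrow, fun k => ⟨rfl, rfl, by simp⟩⟩
    | succ m ih =>
      intro hm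
      obtain ⟨hlen, hrows, hvals⟩ := ih (by omega)
      rw [List.range_succ]
      simp only [List.foldl_append, List.foldl_cons, List.foldl_nil]
      set r := (List.range m).foldl
        (fun gl i => gl.set i ((gl.getD i []).set 2 (pvGet2 gl i 0 - pvGet2 gl i 1))) gl with hr
      have ha : m < r.length := by omega
      have ht : (2 : Nat) < (r.getD m []).length := by rw [pvRowLen r 3 m hrows ha]; omega
      refine ⟨by rw [List.length_set]; omega, pvSet2_rowlen r m 2 _ 3 ha hrows, ?_⟩
      intro k
      rw [pvGet2_set2 r m 2 _ ha ht k 0, pvGet2_set2 r m 2 _ ha ht k 1,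
        pvGet2_set2 r m 2 _ ha ht k 2]
      refine ⟨by rw [if_neg (by rintro ⟨-, h⟩; omega)]; exact (hvals k).1,
        by rw [if_neg (by rintro ⟨-, h⟩; omega)]; exact (hvals k).2.1, ?_⟩
      by_cases hk : k = m
      · subst hk
        rw [if_pos ⟨rfl, rfl⟩, if_pos (by omega), (hvals k).1, (hvals k).2.1]
      · rw [if_neg (by rintro ⟨h, -⟩; exact hk h), (hvals k).2.2]
        by_cases hk' : k < m
        · rw [if_pos hk', if_pos (by omega)]
        · rw [if_neg hk', if_neg (by omega)]
  obtain ⟨h1, _, h3⟩ := aux gl.length le_rfl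
  exact ⟨h1, fun k hk => by rw [(h3 k).2.2, if_pos hk]⟩

-- branch-structure equivalence: A's four-branch body is one conditional increment
lemma pvStepScoreA_eq (c : Nat → Nat → Int) (d : Nat → Int) (s : List Int) (i j : Nat) :
    pvStepScoreA c d s i j = if !(i == j) && pvWin c d i j then pvInc1 s i else s := by
  simp only [pvStepScoreA, pvWin, Bool.and_eq_true, Bool.not_eq_eq_eq_not, Bool.not_true,
    beq_eq_false_iff_ne, ne_eq, decide_eq_true_eq]
  split_ifs <;> simp_all <;> omega

-- A's inner loop: repeated conditional increments of one fixed slot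
lemma pvInnerA (q : Nat → Bool) (i : Nat) :
    ∀ (js : List Nat) (s : List Int), i < s.length →
      js.foldl (fun s j => if q j then pvInc1 s i else s) s
        = s.set i (s.getD i 0 + (js.countP q : Int)) := by
  intro js
  induction js with
  | nil =>
    intro s hi
    simp only [List.foldl_nil, List.countP_nil, Nat.cast_zero, add_zero]
    rw [List.getD_eq_getElem _ _ hi, List.set_getElem_self]
  | cons j t ih =>
    intro s hi
    simp only [List.foldl_cons, List.countP_cons]
    by_cases hq : q j
    · rw [if_pos hq, ih (pvInc1 s i) (by rw [pvInc1_length]; exact hi)]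
      rw [pvInc1_getD s i hi i, if_pos rfl]
      simp only [pvInc1, List.set_set, hq, if_pos]
      congr 1
      push_cast
      ring
    · rw [if_neg hq, ih s hi]
      simp [hq]

-- A's scoring loops compute the per-person win count
lemma pvScoreAEval (n : Nat) (c : Nat → Nat → Int) (d : Nat → Int) :
    (List.range n).foldl (fun s i =>
        (List.range n).foldl (fun s j => pvStepScoreA c d s i j) s)
      (List.replicate n (0 : Int))
    = (List.range n).map (fun k =>
        ((List.range n).countP (fun j => !(k == j) && pvWin c d k j) : Int)) := by
  have outer : ∀ m, m ≤ n →
      (List.range m).foldl (fun s i =>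
          (List.range n).foldl (fun s j => pvStepScoreA c d s i j) s)
        (List.replicate n (0 : Int))
      = (List.range n).map (fun k =>
          if k < m then ((List.range n).countP (fun j => !(k == j) && pvWin c d k j) : Int) else 0) := by
    intro m
    induction m with
    | zero =>
      intro _
      refine List.ext_getElem (by simp) ?_
      intro k h1 h2
      simp
    | succ m ih =>
      intro hm
      rw [List.range_succ, List.foldl_append, List.foldl_cons, List.foldl_nil, ih (by omega)]
      set g := fun k =>
        if k < m then ((List.range n).countP (fun j => !(k == j) && pvWin c d k j) : Int) else 0
        with hg
      have hlen : ((List.range n).map g).length = n := by simp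
      have hmn : m < ((List.range n).map g).length := by omega
      have : (List.range n).foldl (fun s j => pvStepScoreA c d s m j) ((List.range n).map g)
          = ((List.range n).map g).set m (((List.range n).map g).getD m 0
              + ((List.range n).countP (fun j => !(m == j) && pvWin c d m j) : Int)) := by
        calc (List.range n).foldl (fun s j => pvStepScoreA c d s m j) ((List.range n).map g)
            = (List.range n).foldl
                (fun s j => if !(m == j) && pvWin c d m j then pvInc1 s m else s)
                ((List.range n).map g) := by
              simp only [pvStepScoreA_eq]
          _ = _ := pvInnerA _ m (List.range n) _ hmn
      rw [this]
      have hgm : ((List.range n).map g).getD m 0 = 0 := by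
        rw [List.getD_eq_getElem _ _ hmn, List.getElem_map, List.getElem_range]
        simp [hg]
      rw [hgm, zero_add]
      refine List.ext_getElem (by simp) ?_
      intro k h1 h2
      rw [List.getElem_set]
      simp only [List.getElem_map, List.getElem_range]
      by_cases hk : m = k
      · subst hk
        rw [if_pos rfl, if_pos (by omega)]
      · rw [if_neg hk]
        simp only [hg]
        by_cases hk' : k < m
        · rw [if_pos hk', if_pos (by omega)]
        · rw [if_neg hk', if_neg (by omega)]
  rw [outer n le_rfl]
  exact List.map_congr_left fun k hk => by rw [if_pos (List.mem_range.mp hk)]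

-- step functions only read c/d at the visited indices
lemma pvStepScoreA_congr (c c' : Nat → Nat → Int) (d d' : Nat → Int) (s : List Int) (i j : Nat)
    (h1 : c i j = c' i j) (h2 : c j i = c' j i) (h3 : d i = d' i) (h4 : d j = d' j) :
    pvStepScoreA c d s i j = pvStepScoreA c' d' s i j := by
  simp only [pvStepScoreA, h1, h2, h3, h4]

-- A evaluates to the per-person win counts
lemma pvSolAEval (friends gifts : List String) :
    solution friends gifts = (PySem.List.max? ((List.range friends.length).map (fun k =>
      ((List.range friends.length).countP (fun j => !(k == j) &&
        pvWin (pvCntF (pvPairs (pvMkIdx friends) gifts))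
          (pvDF (pvPairs (pvMkIdx friends) gifts)) k j) : Int))) id).getD 0 := by
  simp only [solution]
  rw [pvFoldA]
  set n := friends.length with hn
  set fidx := pvMkIdx friends with hfidx
  set pl := pvPairs fidx gifts with hpl
  set cF := pvCntF pl with hcF
  have hval : ∀ p ∈ pl, p.1 < n ∧ p.2 < n := by
    intro p hp
    rw [hpl, pvPairs] at hp
    obtain ⟨g, _, hparse⟩ := List.mem_filterMap.mp hp
    exact pvParse_bound friends g p hparse
  obtain ⟨hA1, hA2, hA3, hA4, hA5, hA6⟩ := pvPhaseA n pl hval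
  set stA := pl.foldl pvPairStepA
    (List.replicate n (List.replicate n 0), List.replicate n (List.replicate 3 0)) with hstA
  set glA := (List.range stA.2.length).foldl
    (fun gl i => gl.set i ((gl.getD i []).set 2 (pvGet2 gl i 0 - pvGet2 gl i 1))) stA.2 with hglA
  have hphase2 := pvPhase2 stA.2 hA5
  have hRowA : ∀ i, i < n → (stA.1.getD i []).length = n := fun i hi =>
    pvRowLen _ _ _ hA2 (by omega)
  have hdF : ∀ x, x < n → pvGet2 glA x 2 = pvDF pl x := by
    intro x hx
    rw [hglA, hphase2.2 x (by omega), (hA6 x hx).1, (hA6 x hx).2]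
    rfl
  have houter : (List.range n).foldl
      (fun s i => (List.range (stA.1.getD i []).length).foldl
        (fun s j => pvStepScoreA (fun x y => pvGet2 stA.1 x y) (fun x => pvGet2 glA x 2) s i j) s)
      (List.replicate n (0 : Int))
    = (List.range n).foldl
      (fun s i => (List.range n).foldl (fun s j => pvStepScoreA cF (pvDF pl) s i j) s)
      (List.replicate n (0 : Int)) := by
    refine PySem.List.foldl_congr_mem _ _ _ _ ?_
    intro s i hi
    have hi' : i < n := List.mem_range.mp hi
    rw [hRowA i hi']
    refine PySem.List.foldl_congr_mem _ _ _ _ ?_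
    intro acc j hj
    have hj' : j < n := List.mem_range.mp hj
    exact pvStepScoreA_congr _ _ _ _ acc i j (hA3 i j hi' hj') (hA3 j i hj' hi')
      (hdF i hi') (hdF j hj')
  rw [hA1, houter, pvScoreAEval n cF (pvDF pl)]

-- ============ B-side lemmas ============

-- l[k] += c  (the common shape of B's single-slot updates)
def pvAdd1 (l : List Int) (k : Nat) (c : Int) : List Int := l.set k (l.getD k 0 + c)

lemma pvAdd1_length (l : List Int) (k : Nat) (c : Int) : (pvAdd1 l k c).length = l.length := by
  simp [pvAdd1]

lemma pvAdd1_getD (l : List Int) (k : Nat) (c : Int) (hk : k < l.length) (j : Nat) :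
    (pvAdd1 l k c).getD j 0 = if j = k then l.getD j 0 + c else l.getD j 0 := by
  simp only [pvAdd1, List.getD_eq_getElem?_getD, List.getElem?_set]
  by_cases h : j = k
  · subst h; simp [hk]
  · rw [if_neg (fun hh : k = j => h hh.symm), if_neg h]

-- B's net update written with pvAdd1
def pvNetStep (net : List Int) (p : Nat × Nat) : List Int :=
  pvAdd1 (pvAdd1 net p.1 1) p.2 (-1)

-- B's gift loop = counter dict + net fold over the parsed pair list
lemma pvFoldC (fidx : PySem.Dict String Int) (gifts : List String)
    (st : PySem.Dict (Nat × Nat) Int × List Int) :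
    gifts.foldl (pvStepC fidx) st = (pvPairs fidx gifts).foldl pvPairStepC st := by
  induction gifts generalizing st with
  | nil => rfl
  | cons g t ih =>
    simp only [List.foldl_cons, pvPairs, List.filterMap_cons]
    cases h : pvParse fidx g with
    | none => simpa [pvStepC, h, pvPairs] using ih st
    | some p => simpa [pvStepC, h, pvPairs] using ih (pvPairStepC st p)

lemma pvSplitC (pl : List (Nat × Nat)) (n : Nat) :
    pl.foldl pvPairStepC (PySem.Dict.empty, List.replicate n (0 : Int))
      = (PySem.Dict.counter pl, pl.foldl pvNetStep (List.replicate n (0 : Int))) := by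
  have aux : ∀ (l : List (Nat × Nat)) (d : PySem.Dict (Nat × Nat) Int) (net : List Int),
      l.foldl pvPairStepC (d, net)
        = (l.foldl (fun d x => d.modify x 0 (· + 1)) d, l.foldl pvNetStep net) := by
    intro l
    induction l with
    | nil => intro d net; rfl
    | cons p t ih =>
      intro d net
      rw [List.foldl_cons, List.foldl_cons, List.foldl_cons,
        show pvPairStepC (d, net) p = (d.modify p 0 (· + 1), pvNetStep net p) by
          simp [pvPairStepC, pvNetStep, pvAdd1, sub_eq_add_neg]]
      exact ih _ _
  rw [aux, PySem.Dict.counter_eq_foldl]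

lemma pvNetLen (pl : List (Nat × Nat)) (net : List Int) :
    (pl.foldl pvNetStep net).length = net.length := by
  induction pl generalizing net with
  | nil => rfl
  | cons p t ih => rw [List.foldl_cons, ih]; simp [pvNetStep, pvAdd1_length]

lemma pvNetChar (n : Nat) (pl : List (Nat × Nat)) (hval : ∀ p ∈ pl, p.1 < n ∧ p.2 < n)
    (k : Nat) (hk : k < n) :
    (pl.foldl pvNetStep (List.replicate n (0 : Int))).getD k 0 = pvDF pl k := by
  revert hval
  induction pl using List.reverseRecOn with
  | nil =>
    intro _
    simp [pvDF, pvGivF, pvRcvF, pvGetD_replicate]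
  | append_singleton q p ih =>
    intro hval
    have hq := fun r hr => hval r (List.mem_append_left _ hr)
    have hp : p.1 < n ∧ p.2 < n := hval _ (List.mem_append_right _ (List.mem_singleton_self _))
    rw [List.foldl_append, List.foldl_cons, List.foldl_nil]
    set net := q.foldl pvNetStep (List.replicate n (0 : Int)) with hnet
    have hlen : net.length = n := by rw [hnet, pvNetLen, List.length_replicate]
    have h1 : p.1 < net.length := by omega
    have h2 : p.2 < (pvAdd1 net p.1 1).length := by rw [pvAdd1_length]; omega
    show (pvAdd1 (pvAdd1 net p.1 1) p.2 (-1)).getD k 0 = _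
    rw [pvAdd1_getD _ _ _ h2 k, pvAdd1_getD _ _ _ h1 k, ih hq]
    simp only [pvDF, pvGivF, pvRcvF, List.countP_append, List.countP_cons, List.countP_nil]
    by_cases e1 : k = p.1 <;> by_cases e2 : k = p.2 <;>
      · simp [e1, e2]
        push_cast
        omega

-- the rank fold records, for each value, the index of its FIRST occurrence
lemma pvRankFold (s : List Int) (off : Int) (d0 : PySem.Dict Int Int) (v : Int) :
    ((PySem.List.enumerate s off).foldl
        (fun d p => if d.contains p.2 then d else d.insert p.2 p.1) d0).get? v
      = if d0.contains v then d0.get? v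
        else (PySem.List.index? s v).map (fun k => off + (k : Int)) := by
  induction s generalizing off d0 with
  | nil =>
    simp only [PySem.List.enumerate_nil, List.foldl_nil]
    by_cases hv : d0.contains v = true
    · rw [if_pos hv]
    · rw [if_neg hv, (PySem.Dict.get?_eq_none_iff_contains d0 v).mpr (by simp [hv])]
      simp [PySem.List.index?_eq_idxOf?]
  | cons x t ih =>
    rw [PySem.List.enumerate_cons, List.foldl_cons]
    by_cases hx : d0.contains x = true
    · rw [if_pos hx, ih]
      by_cases hv : d0.contains v = true
      · simp [hv]
      · rw [if_neg hv, if_neg hv]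
        have hvx : x ≠ v := by rintro rfl; exact hv hx
        rw [PySem.List.index?_cons_of_ne t hvx]
        cases hio : PySem.List.index? t v with
        | none => simp [hio]
        | some c => simp [hio] <;> omega
    · rw [if_neg hx, ih]
      by_cases hvx : v = x
      · subst hvx
        have hc1 : (d0.insert v off).contains v = true := by
          rw [PySem.Dict.contains_insert]; simp
        rw [if_pos hc1, PySem.Dict.get?_insert_self, if_neg hx, PySem.List.index?_cons_self]
        simp
      · have hcon : (d0.insert x off).contains v = d0.contains v := by
          rw [PySem.Dict.contains_insert]; simp [hvx]
        rw [hcon]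
        by_cases hv : d0.contains v = true
        · rw [if_pos hv, if_pos hv, PySem.Dict.get?_insert_of_ne _ _ hvx]
        · rw [if_neg hv, if_neg hv,
            PySem.List.index?_cons_of_ne t (fun h => hvx h.symm)]
          cases hio : PySem.List.index? t v with
          | none => simp [hio]
          | some c => simp [hio] <;> omega

-- in a sorted list, the first occurrence index of a member is the number of smaller elements
lemma pvIdxSorted (s : List Int) (hs : s.Pairwise (· ≤ ·)) (v : Int) (hv : v ∈ s) :
    PySem.List.index? s v = some (s.countP (fun x => decide (x < v))) := by
  induction s with
  | nil => cases hv
  | cons a t ih =>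
    obtain ⟨ha, ht⟩ := List.pairwise_cons.mp hs
    by_cases hva : v = a
    · subst hva
      rw [PySem.List.index?_cons_self]
      have h0 : t.countP (fun x => decide (x < v)) = 0 :=
        List.countP_eq_zero.mpr (fun x hx => by
          simp only [decide_eq_true_eq]
          exact not_lt.mpr (ha x hx))
      rw [List.countP_cons]
      simp [h0]
    · rcases List.mem_cons.mp hv with h | h
      · exact absurd h hva
      · rw [PySem.List.index?_cons_of_ne t (fun h' => hva h'.symm), ih ht h]
        have hav : a < v := lt_of_le_of_ne (ha v h) (fun h' => hva h'.symm)
        rw [List.countP_cons]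
        simp [hav]

lemma pvRank_getD (net : List Int) (v : Int) (hv : v ∈ net) :
    (pvRankDict (PySem.List.sorted net (fun x => x) false)).getD v 0
      = (net.countP (fun x => decide (x < v)) : Int) := by
  have hgetD : ∀ (d : PySem.Dict Int Int) (k dflt : Int),
      d.getD k dflt = (d.get? k).getD dflt := fun _ _ _ => rfl
  set s := PySem.List.sorted net (fun x => x) false with hs
  have hpw : s.Pairwise (· ≤ ·) := PySem.List.sorted_pairwise net (fun x => x)
  have hvs : v ∈ s := (PySem.List.mem_sorted net (fun x => x) false v).mpr hv
  have hidx := pvIdxSorted s hpw v hvs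
  have hcnt : s.countP (fun x => decide (x < v)) = net.countP (fun x => decide (x < v)) :=
    List.Perm.countP_eq _ (PySem.List.sorted_perm net (fun x => x) false)
  rw [hgetD]
  unfold pvRankDict
  rw [pvRankFold s 0 PySem.Dict.empty v,
    if_neg (by simp [show (PySem.Dict.empty : PySem.Dict Int Int).contains v = false from rfl]),
    hidx]
  simp [hcnt]

-- per-pair gain of person k under B's pair rule relative to the net-only baseline
def pvE (pl : List (Nat × Nat)) (k j : Nat) : Int :=
  if pvCntF pl k j = pvCntF pl j k then 0
  else (if pvCntF pl j k < pvCntF pl k j then 1 else 0) - (if pvDF pl j < pvDF pl k then 1 else 0)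

def pvDelta (pl : List (Nat × Nat)) (p : Nat × Nat) (k : Nat) : Int :=
  (if k = p.1 then pvE pl k p.2 else 0) + (if k = p.2 then pvE pl k p.1 else 0)

-- the keys B's correction loop actually processes (one orientation per unordered pair)
def pvP (cnt : PySem.Dict (Nat × Nat) Int) : List (Nat × Nat) :=
  cnt.keys.filter (fun p => !(cnt.contains (p.2, p.1) && decide (p.2 < p.1)))

-- the else-branch of B's correction step, as a named function
def pvCorrBody (cnt : PySem.Dict (Nat × Nat) Int) (net : List Int) (s : List Int)
    (p : Nat × Nat) : List Int :=
  let a := cnt.getD p 0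
  let b := cnt.getD (p.2, p.1) 0
  if a = b then s
  else
    let w := if b < a then p.1 else p.2
    let l := if b < a then p.2 else p.1
    let s1 := s.set w (s.getD w 0 + (if net.getD l 0 < net.getD w 0 then 0 else 1))
    s1.set l (s1.getD l 0 - (if net.getD w 0 < net.getD l 0 then 1 else 0))

lemma pvCorrFoldFilter (cnt : PySem.Dict (Nat × Nat) Int) (net : List Int) (s : List Int) :
    cnt.keys.foldl (pvCorrStep cnt net) s = (pvP cnt).foldl (pvCorrBody cnt net) s := by
  have hcongr : ∀ (s : List Int) (p : Nat × Nat), pvCorrStep cnt net s p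
      = if (!(cnt.contains (p.2, p.1) && decide (p.2 < p.1))) = true
          then pvCorrBody cnt net s p else s := by
    intro s p
    unfold pvCorrStep pvCorrBody
    cases h : (cnt.contains (p.2, p.1) && decide (p.2 < p.1)) <;> simp [h]
  rw [PySem.List.foldl_congr_mem _ _ _ _ (fun acc p _ => hcongr acc p),
    PySem.List.foldl_if_eq_foldl_filter]
  rfl

-- one correction step adds pvDelta to every slot
lemma pvCorrStepChar (pl : List (Nat × Nat)) (cnt : PySem.Dict (Nat × Nat) Int) (net : List Int)
    (hc : ∀ q, cnt.getD q 0 = pvCntF pl q.1 q.2)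
    (hn : ∀ x, x < net.length → net.getD x 0 = pvDF pl x)
    (s : List Int) (p : Nat × Nat) (hp1 : p.1 < s.length) (hp2 : p.2 < s.length)
    (hsn : s.length = net.length) :
    (pvCorrBody cnt net s p).length = s.length ∧
    ∀ k, (pvCorrBody cnt net s p).getD k 0 = s.getD k 0 + pvDelta pl p k := by
  have hcf1 : cnt.getD p 0 = pvCntF pl p.1 p.2 := hc p
  have hcf2 : cnt.getD (p.2, p.1) 0 = pvCntF pl p.2 p.1 := hc (p.2, p.1)
  have hn1 : net.getD p.1 0 = pvDF pl p.1 := hn p.1 (by omega)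
  have hn2 : net.getD p.2 0 = pvDF pl p.2 := hn p.2 (by omega)
  by_cases heq : pvCntF pl p.1 p.2 = pvCntF pl p.2 p.1
  · have hif : pvCorrBody cnt net s p = s := by
      unfold pvCorrBody
      rw [hcf1, hcf2, if_pos heq]
    rw [hif]
    refine ⟨rfl, fun k => ?_⟩
    simp only [pvDelta, pvE]
    by_cases e1 : k = p.1 <;> by_cases e2 : k = p.2 <;> simp_all
  · have hne12 : p.1 ≠ p.2 := by rintro h12; rw [h12] at heq; exact heq rfl
    by_cases hba : pvCntF pl p.2 p.1 < pvCntF pl p.1 p.2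
    · have hbody : pvCorrBody cnt net s p
          = pvAdd1 (pvAdd1 s p.1 (if pvDF pl p.2 < pvDF pl p.1 then 0 else 1)) p.2
              (-(if pvDF pl p.1 < pvDF pl p.2 then 1 else 0)) := by
        unfold pvCorrBody pvAdd1
        rw [hcf1, hcf2]
        simp only [if_neg heq, if_pos hba, hn1, hn2, sub_eq_add_neg]
      have h2 : p.2 < (pvAdd1 s p.1 (if pvDF pl p.2 < pvDF pl p.1 then 0 else 1)).length := by
        rw [pvAdd1_length]; omega
      refine ⟨by rw [hbody, pvAdd1_length, pvAdd1_length], fun k => ?_⟩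
      rw [hbody, pvAdd1_getD _ _ _ h2 k, pvAdd1_getD _ _ _ hp1 k]
      simp only [pvDelta, pvE]
      by_cases e1 : k = p.1 <;> by_cases e2 : k = p.2 <;>
        · simp [e1, e2]
          try (split_ifs <;> simp_all <;> omega)
    · have hab : pvCntF pl p.1 p.2 < pvCntF pl p.2 p.1 := by omega
      have hbody : pvCorrBody cnt net s p
          = pvAdd1 (pvAdd1 s p.2 (if pvDF pl p.1 < pvDF pl p.2 then 0 else 1)) p.1
              (-(if pvDF pl p.2 < pvDF pl p.1 then 1 else 0)) := by
        unfold pvCorrBody pvAdd1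
        rw [hcf1, hcf2]
        simp only [if_neg heq, if_neg hba, hn1, hn2, sub_eq_add_neg]
      have h2 : p.1 < (pvAdd1 s p.2 (if pvDF pl p.1 < pvDF pl p.2 then 0 else 1)).length := by
        rw [pvAdd1_length]; omega
      refine ⟨by rw [hbody, pvAdd1_length, pvAdd1_length], fun k => ?_⟩
      rw [hbody, pvAdd1_getD _ _ _ h2 k, pvAdd1_getD _ _ _ hp2 k]
      simp only [pvDelta, pvE]
      by_cases e1 : k = p.1 <;> by_cases e2 : k = p.2 <;>
        · simp [e1, e2]
          try (split_ifs <;> simp_all <;> omega)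

-- the whole correction fold adds the summed deltas
lemma pvCorrFoldChar (pl : List (Nat × Nat)) (cnt : PySem.Dict (Nat × Nat) Int) (net : List Int)
    (hc : ∀ q, cnt.getD q 0 = pvCntF pl q.1 q.2)
    (hn : ∀ x, x < net.length → net.getD x 0 = pvDF pl x)
    (P : List (Nat × Nat)) (hb : ∀ p ∈ P, p.1 < net.length ∧ p.2 < net.length)
    (s : List Int) (hsn : s.length = net.length) :
    (P.foldl (pvCorrBody cnt net) s).length = s.length ∧
    ∀ k, (P.foldl (pvCorrBody cnt net) s).getD k 0
        = s.getD k 0 + (P.map (fun p => pvDelta pl p k)).sum := by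
  induction P generalizing s with
  | nil => simp
  | cons p t ih =>
    have hp := hb p List.mem_cons_self
    obtain ⟨hl, hg⟩ := pvCorrStepChar pl cnt net hc hn s p (by omega) (by omega) hsn
    obtain ⟨ihl, ihg⟩ := ih (fun r hr => hb r (List.mem_cons_of_mem _ hr))
      (pvCorrBody cnt net s p) (by omega)
    rw [List.foldl_cons]
    refine ⟨by rw [ihl, hl], fun k => ?_⟩
    rw [ihg k, hg k, List.map_cons, List.sum_cons]
    ring

-- structural properties of the processed key list
lemma pvP_nodup (pl : List (Nat × Nat)) : (pvP (PySem.Dict.counter pl)).Nodup := by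
  exact (PySem.Dict.nodup_keys_counter pl).filter _

lemma pvP_mem_pl (pl : List (Nat × Nat)) (p : Nat × Nat) (hp : p ∈ pvP (PySem.Dict.counter pl)) :
    p ∈ pl := by
  have h1 := (List.mem_filter.mp hp).1
  rw [PySem.Dict.keys_counter] at h1
  exact (PySem.Set.mem_ofList pl p).mp h1

lemma pvP_repr (pl : List (Nat × Nat)) (i j : Nat) (h : pvCntF pl i j ≠ pvCntF pl j i) :
    (i, j) ∈ pvP (PySem.Dict.counter pl) ∨ (j, i) ∈ pvP (PySem.Dict.counter pl) := by
  have hkey : ∀ a b : Nat, (a, b) ∈ (PySem.Dict.counter pl).keys →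
      (a, b) ∈ pvP (PySem.Dict.counter pl) ∨ (b, a) ∈ pvP (PySem.Dict.counter pl) := by
    intro a b hab
    by_cases hc : (PySem.Dict.counter pl).contains (b, a) = true ∧ b < a
    · right
      refine List.mem_filter.mpr ⟨(PySem.Dict.contains_iff_mem_keys _ _).mp hc.1, ?_⟩
      have hnab : ¬ a < b := by omega
      simp [hnab]
    · left
      refine List.mem_filter.mpr ⟨hab, ?_⟩
      by_cases hcb : (PySem.Dict.counter pl).contains (b, a) = true
      · have hnb : ¬ b < a := fun hba => hc ⟨hcb, hba⟩
        simp [hcb, hnb]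
      · simp [hcb]
  have hmem : (i, j) ∈ pl ∨ (j, i) ∈ pl := by
    by_cases h1 : (i, j) ∈ pl
    · exact Or.inl h1
    · right
      have hz : pl.count (i, j) = 0 := List.count_eq_zero.mpr h1
      have hnz : pl.count (j, i) ≠ 0 := by
        intro hz2
        exact h (by simp [pvCntF, hz, hz2])
      exact List.count_pos_iff.mp (Nat.pos_of_ne_zero hnz)
  rcases hmem with hm | hm
  · exact hkey i j (by
      rw [PySem.Dict.keys_counter]
      exact (PySem.Set.mem_ofList pl _).mpr hm)
  · exact (hkey j i (by
      rw [PySem.Dict.keys_counter]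
      exact (PySem.Set.mem_ofList pl _).mpr hm)).symm

lemma pvP_uniq (pl : List (Nat × Nat)) (i j : Nat) (hij : i ≠ j) :
    ¬((i, j) ∈ pvP (PySem.Dict.counter pl) ∧ (j, i) ∈ pvP (PySem.Dict.counter pl)) := by
  rintro ⟨h1, h2⟩
  have k1 := (List.mem_filter.mp h1).2
  have k2 := (List.mem_filter.mp h2).2
  have c1 : (PySem.Dict.counter pl).contains (j, i) = true :=
    (PySem.Dict.contains_iff_mem_keys _ _).mpr (List.mem_filter.mp h2).1
  have c2 : (PySem.Dict.counter pl).contains (i, j) = true :=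
    (PySem.Dict.contains_iff_mem_keys _ _).mpr (List.mem_filter.mp h1).1
  simp only [c1, c2, Bool.true_and, Bool.not_eq_eq_eq_not, Bool.not_true,
    decide_eq_false_iff_not] at k1 k2
  omega

-- the summed deltas over the processed pairs are the summed per-opponent gains
lemma pvDeltaSum (pl : List (Nat × Nat)) (n : Nat) (hval : ∀ p ∈ pl, p.1 < n ∧ p.2 < n)
    (k : Nat) (hk : k < n) :
    ((pvP (PySem.Dict.counter pl)).map (fun p => pvDelta pl p k)).sum
      = ((List.range n).map (fun j => pvE pl k j)).sum := by
  classical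
  set P := pvP (PySem.Dict.counter pl) with hP
  have hnd : P.Nodup := pvP_nodup pl
  have hself : pvE pl k k = 0 := by simp [pvE]
  have hboundP : ∀ p ∈ P, p.1 < n ∧ p.2 < n := fun p hp => hval p (pvP_mem_pl pl p hp)
  have hEne : ∀ j, pvE pl k j ≠ 0 → pvCntF pl k j ≠ pvCntF pl j k := by
    intro j hje heq
    exact hje (by simp [pvE, heq])
  have hEj : ∀ j, pvE pl k j ≠ 0 → j ≠ k ∧ j < n := by
    intro j hje
    have hne := hEne j hje
    refine ⟨by rintro rfl; exact hne rfl, ?_⟩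
    by_cases hm : (k, j) ∈ pl
    · exact (hval _ hm).2
    · have hz : pl.count (k, j) = 0 := List.count_eq_zero.mpr hm
      have hnz : pl.count (j, k) ≠ 0 := fun hz2 => hne (by simp [pvCntF, hz, hz2])
      exact (hval _ (List.count_pos_iff.mp (Nat.pos_of_ne_zero hnz))).1
  have hstruct : ∀ p, pvDelta pl p k ≠ 0 →
      (p.1 = k ∧ p.2 ≠ k ∧ pvDelta pl p k = pvE pl k p.2) ∨
      (p.2 = k ∧ p.1 ≠ k ∧ pvDelta pl p k = pvE pl k p.1) := by
    intro p hpd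
    by_cases e1 : p.1 = k
    · by_cases e2 : p.2 = k
      · exact absurd (by simp [pvDelta, e1, e2, hself]) hpd
      · have e2' : k ≠ p.2 := fun h => e2 h.symm
        exact Or.inl ⟨e1, e2, by simp [pvDelta, e1, e2']⟩
    · by_cases e2 : p.2 = k
      · have e1' : k ≠ p.1 := fun h => e1 h.symm
        exact Or.inr ⟨e2, e1, by simp [pvDelta, e2, e1']⟩
      · have e1' : k ≠ p.1 := fun h => e1 h.symm
        have e2' : k ≠ p.2 := fun h => e2 h.symm
        exact absurd (by simp [pvDelta, e1', e2']) hpd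
  rw [← List.sum_toFinset _ hnd, ← List.sum_toFinset _ (List.nodup_range (n := n)),
    List.toFinset_range, ← Finset.sum_filter_ne_zero P.toFinset,
    ← Finset.sum_filter_ne_zero (Finset.range n)]
  refine Finset.sum_nbij' (fun p => if p.1 = k then p.2 else p.1)
    (fun j => if (k, j) ∈ P then (k, j) else (j, k)) ?_ ?_ ?_ ?_ ?_
  · -- maps into the target filter
    intro p hp
    dsimp only
    obtain ⟨hpP, hpd⟩ := Finset.mem_filter.mp hp
    have hpP' : p ∈ P := List.mem_toFinset.mp hpP
    rcases hstruct p hpd with ⟨e1, e2, hv⟩ | ⟨e2, e1, hv⟩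
    · rw [if_pos e1]
      exact Finset.mem_filter.mpr
        ⟨Finset.mem_range.mpr (hboundP p hpP').2, by rw [← hv]; exact hpd⟩
    · rw [if_neg e1]
      exact Finset.mem_filter.mpr
        ⟨Finset.mem_range.mpr (hboundP p hpP').1, by rw [← hv]; exact hpd⟩
  · -- maps back into the source filter
    intro j hj
    dsimp only
    obtain ⟨hjr, hje⟩ := Finset.mem_filter.mp hj
    obtain ⟨hjk, hjn⟩ := hEj j hje
    have hrep : (k, j) ∈ P ∨ (j, k) ∈ P := pvP_repr pl k j (hEne j hje)
    by_cases hm : (k, j) ∈ P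
    · rw [if_pos hm]
      refine Finset.mem_filter.mpr ⟨List.mem_toFinset.mpr hm, ?_⟩
      have hkj : k ≠ j := fun h => hjk h.symm
      simpa [pvDelta, hkj] using hje
    · rw [if_neg hm]
      have hm2 : (j, k) ∈ P := hrep.resolve_left hm
      refine Finset.mem_filter.mpr ⟨List.mem_toFinset.mpr hm2, ?_⟩
      have hkj : k ≠ j := fun h => hjk h.symm
      simpa [pvDelta, hkj] using hje
  · -- left inverse
    intro p hp
    dsimp only
    obtain ⟨hpP, hpd⟩ := Finset.mem_filter.mp hp
    have hpP' : p ∈ P := List.mem_toFinset.mp hpP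
    rcases hstruct p hpd with ⟨e1, e2, hv⟩ | ⟨e2, e1, hv⟩
    · rw [if_pos e1]
      have hmem : (k, p.2) ∈ P := by rw [← e1]; exact hpP'
      rw [if_pos hmem, ← e1]
    · rw [if_neg e1]
      have hmem : (p.1, k) ∈ P := by rw [← e2]; exact hpP'
      have hnot : (k, p.1) ∉ P := fun hc =>
        pvP_uniq pl k p.1 (fun h => e1 h.symm) ⟨hc, hmem⟩
      rw [if_neg hnot, ← e2]
  · -- right inverse
    intro j hj
    dsimp only
    obtain ⟨hjr, hje⟩ := Finset.mem_filter.mp hj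
    obtain ⟨hjk, hjn⟩ := hEj j hje
    by_cases hm : (k, j) ∈ P
    · rw [if_pos hm]
      simp
    · rw [if_neg hm]
      simp [hjk]
  · -- values agree
    intro p hp
    dsimp only
    obtain ⟨hpP, hpd⟩ := Finset.mem_filter.mp hp
    rcases hstruct p hpd with ⟨e1, e2, hv⟩ | ⟨e2, e1, hv⟩
    · rw [if_pos e1, hv]
    · rw [if_neg e1, hv]

-- baseline + gain = A's per-pair indicator
lemma pvPointwise (pl : List (Nat × Nat)) (k j : Nat) :
    (if !(k == j) && pvWin (pvCntF pl) (pvDF pl) k j then (1 : Int) else 0)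
      = (if pvDF pl j < pvDF pl k then 1 else 0) + pvE pl k j := by
  simp only [pvWin, pvE, Bool.and_eq_true, Bool.not_eq_eq_eq_not, Bool.not_true,
    beq_eq_false_iff_ne, ne_eq, decide_eq_true_eq]
  by_cases hkj : k = j
  · subst hkj; simp
  · split_ifs <;> omega

-- B evaluates to the same per-person win counts
lemma pvSolBEval (friends gifts : List String) :
    solution_alt friends gifts = (PySem.List.max? ((List.range friends.length).map (fun k =>
      ((List.range friends.length).countP (fun j => !(k == j) &&
        pvWin (pvCntF (pvPairs (pvMkIdx friends) gifts))
          (pvDF (pvPairs (pvMkIdx friends) gifts)) k j) : Int))) (fun x => x)).getD 0 := by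
  simp only [solution_alt]
  rw [pvFoldC]
  set n := friends.length with hn
  set fidx := pvMkIdx friends with hfidx
  set pl := pvPairs fidx gifts with hpl
  have hval : ∀ p ∈ pl, p.1 < n ∧ p.2 < n := by
    intro p hp
    rw [hpl, pvPairs] at hp
    obtain ⟨g, _, hparse⟩ := List.mem_filterMap.mp hp
    exact pvParse_bound friends g p hparse
  have hsp := pvSplitC pl n
  have hsp1 : (pl.foldl pvPairStepC (PySem.Dict.empty, List.replicate n (0 : Int))).1
      = PySem.Dict.counter pl := by rw [hsp]
  have hsp2 : (pl.foldl pvPairStepC (PySem.Dict.empty, List.replicate n (0 : Int))).2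
      = pl.foldl pvNetStep (List.replicate n (0 : Int)) := by rw [hsp]
  rw [hsp1, hsp2]
  set cnt := PySem.Dict.counter pl with hcnt
  set net := pl.foldl pvNetStep (List.replicate n (0 : Int)) with hnetdef
  have hlen : net.length = n := by rw [hnetdef, pvNetLen, List.length_replicate]
  have hc : ∀ q : Nat × Nat, cnt.getD q 0 = pvCntF pl q.1 q.2 := by
    intro q
    rw [hcnt, PySem.Dict.getD_counter]
    rfl
  have hn' : ∀ x, x < net.length → net.getD x 0 = pvDF pl x := by
    intro x hx
    rw [hnetdef]
    exact pvNetChar n pl hval x (by omega)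
  have hbound : ∀ p ∈ pvP cnt, p.1 < net.length ∧ p.2 < net.length := by
    intro p hp
    have := hval p (pvP_mem_pl pl p (hcnt ▸ hp))
    omega
  set rank := pvRankDict (PySem.List.sorted net (fun x => x) false) with hrank
  set score0 := (List.range n).map (fun i => rank.getD (net.getD i 0) 0) with hscore0
  have hs0len : score0.length = n := by simp [hscore0]
  have hs0 : ∀ k, k < n → score0.getD k 0
      = ((List.range n).countP (fun j => decide (pvDF pl j < pvDF pl k)) : Int) := by
    intro k hk
    have hkn : k < net.length := by omega
    have hkmem : net.getD k 0 ∈ net := by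
      rw [List.getD_eq_getElem net 0 hkn]
      exact List.getElem_mem hkn
    have hgd : score0.getD k 0 = rank.getD (net.getD k 0) 0 := by
      rw [hscore0, List.getD_eq_getElem _ _ (by simpa using hk), List.getElem_map,
        List.getElem_range]
    rw [hgd, hrank, pvRank_getD net _ hkmem]
    have hnetmap : net = (List.range n).map (fun j => pvDF pl j) := by
      refine List.ext_getElem (by simp [hlen]) ?_
      intro x hx1 hx2
      rw [List.getElem_map, List.getElem_range, ← List.getD_eq_getElem net 0 hx1]
      exact hn' x hx1
    rw [hn' k hkn]
    conv_lhs => rw [hnetmap]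
    rw [List.countP_map]
    rfl
  rw [pvCorrFoldFilter]
  obtain ⟨hfl, hfg⟩ := pvCorrFoldChar pl cnt net hc hn' (pvP cnt) hbound score0 (by omega)
  have hfinal : (pvP cnt).foldl (pvCorrBody cnt net) score0
      = (List.range n).map (fun k =>
          (((List.range n).countP (fun j => !(k == j) && pvWin (pvCntF pl) (pvDF pl) k j)) : Int)) := by
    refine List.ext_getElem (by simp [hfl, hs0len]) ?_
    intro k h1 h2
    have hk : k < n := by rw [hfl, hs0len] at h1; exact h1
    rw [← List.getD_eq_getElem _ 0 h1, hfg k, hs0 k hk, List.getElem_map, List.getElem_range]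
    rw [hcnt, pvDeltaSum pl n hval k hk]
    rw [← PySem.List.sum_map_ite_one_zero (fun j => decide (pvDF pl j < pvDF pl k)),
      ← PySem.List.sum_map_add_int,
      ← PySem.List.sum_map_ite_one_zero
        (fun j => !(k == j) && pvWin (pvCntF pl) (pvDF pl) k j)]
    refine congrArg List.sum (List.map_congr_left fun j _ => ?_)
    rw [pvPointwise pl k j]
    simp
  rw [hfinal]

-- the main equality, unconditional on the ports
lemma pvMainEq (friends gifts : List String) :
    solution friends gifts = solution_alt friends gifts := by
  rw [pvSolAEval, pvSolBEval]
  rfl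

-- ===== VERDICT (by name: the statement is the Claim_ definition above) =====
theorem solution_spec : Claim_equal_solution := by
  intro friends gifts _ _
  show solution friends gifts = solution_alt friends gifts
  exact pvMainEq friends gifts
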